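-- pv_equiv track=rewrite | github.com/SNTSVV/PRINS | PRINS/src/main/PRINS.py | partition_log_by_component
-- ===== SOURCE A (Python) =====
-- def partition_log_by_component(l_vector: list) -> list:
--     """
--     Partition a given single log (l_vector) by component.
--     A subsequence of log entries having the same component becomes a single partition.
--
--     :param l_vector: a list of log entries, each of which is composed of 'ts', 'component', 'tid', and 'values'
--     :return: a list of tuples where each tuple is composed of (component, sequence of log entries)
--     """
--
--     partitioned_log = []
--     component_l_vector = []
--     for i in range(len(l_vector)):
--         component_l_vector.append(l_vector[i])
--         if i+1 == len(l_vector) or l_vector[i+1]['component'] != l_vector[i]['component']: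
--             partitioned_log.append((l_vector[i]['component'], component_l_vector))
--             component_l_vector = []
--     return partitioned_log
-- ===== SOURCE B (Python) =====
-- def partition_log_by_component(l_vector: list) -> list:
--     """Two-pointer run scanning: find the end of each component run, then slice."""
--     partitioned_log = []
--     n = len(l_vector)
--     i = 0
--     while i < n:
--         c = l_vector[i]['component']
--         j = i + 1
--         while j < n and l_vector[j]['component'] == c:
--             j += 1
--         partitioned_log.append((c, l_vector[i:j]))
--         i = j
--     return partitioned_log
-- ===== Notes on version B (the rewrite author's own statement) =====
-- stated objective: alternative
-- what changed: Replaced the per-element buffer-append with look-ahead flush/reset logic by a two-pointer run scanner that finds the end of each component run and slices it out in one step.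
import Mathlib
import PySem

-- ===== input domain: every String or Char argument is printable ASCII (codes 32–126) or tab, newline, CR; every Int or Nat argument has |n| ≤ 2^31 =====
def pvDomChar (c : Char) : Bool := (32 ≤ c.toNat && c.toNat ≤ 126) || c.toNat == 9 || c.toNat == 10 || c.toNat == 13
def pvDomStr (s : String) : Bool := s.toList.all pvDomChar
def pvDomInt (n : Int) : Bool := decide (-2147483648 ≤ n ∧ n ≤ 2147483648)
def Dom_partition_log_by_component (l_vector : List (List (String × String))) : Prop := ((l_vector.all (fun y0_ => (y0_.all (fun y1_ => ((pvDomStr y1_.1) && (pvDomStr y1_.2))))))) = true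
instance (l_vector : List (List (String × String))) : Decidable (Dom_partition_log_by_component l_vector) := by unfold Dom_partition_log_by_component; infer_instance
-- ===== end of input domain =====

-- One honest line: B replaces A's buffer-append with look-ahead flush/reset logic
-- by a two-pointer run scanner (find the end of each component run, then slice);
-- same O(n) cost, different decomposition.

-- e['component']; inside Pre_ the key is always present, so the default is never read
def pvComp (e : List (String × String)) : String := PySem.Dict.getD (PySem.Dict.mk e) "component" ""

-- ===== PORT A =====
-- A's loop over i, carried as structural recursion on the remaining entries:
-- state = (flushed partitions so far handled by the cons, current buffer);
-- at each entry append it to the buffer, then flush iff i+1 == len or the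
-- next component differs (the look-ahead boundary test).
def pvLoopA (buf : List (List (String × String))) :
    List (List (String × String)) → List (String × (List (List (String × String))))
  | [] => []
  | [e] => [(pvComp e, buf ++ [e])]
  | e :: e' :: rest =>
      if pvComp e' ≠ pvComp e then
        (pvComp e, buf ++ [e]) :: pvLoopA [] (e' :: rest)
      else
        pvLoopA (buf ++ [e]) (e' :: rest)

def partition_log_by_component (l_vector : List (List (String × String))) : List (String × (List (List (String × String)))) :=
  pvLoopA [] l_vector

-- ===== PORT B =====
-- B's outer while loop: take the run of entries sharing the head's component
-- (the inner j-scan = takeWhile), emit the slice l[i:j], continue after it.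
def partition_log_by_component_alt (l_vector : List (List (String × String))) : List (String × (List (List (String × String)))) :=
  match l_vector with
  | [] => []
  | e :: rest =>
      let c := pvComp e
      (c, e :: rest.takeWhile (fun x => pvComp x = c)) ::
        partition_log_by_component_alt (rest.dropWhile (fun x => pvComp x = c))
termination_by l_vector.length
decreasing_by
  simp only [List.length_cons]
  exact Nat.lt_succ_of_le (List.length_dropWhile_le _ _)

-- ===== PRECONDITION & SPEC =====
-- Pre_ excludes exactly the inputs where some entry lacks the 'component' key:
-- there the Python A raises KeyError (and B raises too).
def Pre_partition_log_by_component (l_vector : List (List (String × String))) : Prop :=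
  ∀ e ∈ l_vector, (PySem.Dict.get? (PySem.Dict.mk e) "component").isSome

instance (l_vector : List (List (String × String))) : Decidable (Pre_partition_log_by_component l_vector) := by unfold Pre_partition_log_by_component; infer_instance

def pvWitness_partition_log_by_component : (List (List (String × String))) :=
  [[("component", "A"), ("ts", "1")], [("component", "A"), ("ts", "2")], [("component", "B"), ("ts", "3")]]

def Spec_partition_log_by_component (l_vector : List (List (String × String))) (out : List (String × (List (List (String × String))))) : Prop := out = partition_log_by_component_alt l_vector
instance (l_vector : List (List (String × String))) (out : List (String × (List (List (String × String))))) : Decidable (Spec_partition_log_by_component l_vector out) := by unfold Spec_partition_log_by_component; infer_instance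

-- ===== CLAIM (what is proved, stated in full; the proofs are below) =====
def Claim_equal_partition_log_by_component : Prop := ∀ (l_vector : List (List (String × String))), Dom_partition_log_by_component l_vector → Pre_partition_log_by_component l_vector → Spec_partition_log_by_component l_vector (partition_log_by_component l_vector)

-- ===== LEMMAS AND PROOFS =====

-- A's loop on a nonempty list produces the head run (prefixed by the carried
-- buffer) followed by B applied to the remainder.
theorem pvLoopA_eq (l : List (List (String × String))) :
    ∀ buf e, pvLoopA buf (e :: l) =
      (pvComp e, buf ++ e :: l.takeWhile (fun x => pvComp x = pvComp e)) ::
        partition_log_by_component_alt (l.dropWhile (fun x => pvComp x = pvComp e)) := by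
  induction l with
  | nil =>
      intro buf e
      simp [pvLoopA, partition_log_by_component_alt]
  | cons e' rest ih =>
      intro buf e
      by_cases h : pvComp e' = pvComp e
      · simp only [pvLoopA, ne_eq, not_true_eq_false, if_false, ih (buf ++ [e]) e',
          List.takeWhile_cons, List.dropWhile_cons, h, decide_true, if_true]
        simp [List.append_assoc]
      · simp only [pvLoopA, ne_eq, not_false_eq_true, if_true, ih [] e',
          List.takeWhile_cons, List.dropWhile_cons, h, decide_false]
        simp [partition_log_by_component_alt]

-- ===== VERDICT (by name: the statement is the Claim_ definition above) =====
theorem partition_log_by_component_spec : Claim_equal_partition_log_by_component := by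
  intro l _ _
  unfold Spec_partition_log_by_component partition_log_by_component
  cases l with
  | nil => simp [pvLoopA, partition_log_by_component_alt]
  | cons e rest =>
      rw [pvLoopA_eq, partition_log_by_component_alt]
      simp
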